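-- pv_equiv track=rewrite | github.com/oliverjmfeix-sketch/ValenceV3 | app/scripts/phase_c_commit_2_converter.py | diff_scalars
-- ===== SOURCE A (Python) =====
-- def diff_scalars(reference: dict, candidate: dict, ignore: set[str]) -> tuple[list[str], list[str], list[str]]:
--     matched, mismatched, missing = [], [], []
--     for k, v_ref in reference.items():
--         if k in ignore:
--             continue
--         v_cand = candidate.get(k)
--         if v_cand is None:
--             missing.append(f"{k} (ref={v_ref!r})")
--         elif v_ref != v_cand:
--             mismatched.append(f"{k}: ref={v_ref!r} cand={v_cand!r}")
--         else:
--             matched.append(k)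
--     return matched, mismatched, missing
-- ===== SOURCE B (Python) =====
-- def diff_scalars(reference: dict, candidate: dict, ignore: set[str]) -> tuple[list[str], list[str], list[str]]:
--     matched = [k for k, v in reference.items()
--                if k not in ignore and candidate.get(k) is not None and candidate.get(k) == v]
--     mismatched = [f"{k}: ref={v!r} cand={candidate.get(k)!r}" for k, v in reference.items()
--                   if k not in ignore and candidate.get(k) is not None and candidate.get(k) != v]
--     missing = [f"{k} (ref={v!r})" for k, v in reference.items()
--                if k not in ignore and candidate.get(k) is None]
--     return matched, mismatched, missing
-- ===== Notes on version B (the rewrite author's own statement) =====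
-- stated objective: simpler
-- what changed: The single partitioning loop with three mutable accumulators is replaced by three independent comprehensions over reference.items(), one per category, each with its own filter.
import Mathlib
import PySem

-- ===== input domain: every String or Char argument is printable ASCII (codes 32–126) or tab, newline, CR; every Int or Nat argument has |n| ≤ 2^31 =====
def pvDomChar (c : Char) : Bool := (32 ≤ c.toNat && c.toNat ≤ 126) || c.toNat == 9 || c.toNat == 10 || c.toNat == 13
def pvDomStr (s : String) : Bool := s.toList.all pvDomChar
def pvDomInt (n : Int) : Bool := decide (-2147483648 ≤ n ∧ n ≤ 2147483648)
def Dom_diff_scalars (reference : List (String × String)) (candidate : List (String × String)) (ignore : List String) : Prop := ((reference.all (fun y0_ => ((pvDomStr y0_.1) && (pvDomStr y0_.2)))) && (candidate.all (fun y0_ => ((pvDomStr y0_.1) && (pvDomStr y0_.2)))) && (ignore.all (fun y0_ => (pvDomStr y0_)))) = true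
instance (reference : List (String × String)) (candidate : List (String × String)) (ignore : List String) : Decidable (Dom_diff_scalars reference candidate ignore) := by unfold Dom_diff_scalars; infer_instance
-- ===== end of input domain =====

-- B replaces A's single loop with three mutable accumulators by three independent
-- one-category passes over reference.items(); same output, simpler decomposition.

-- shared helper: Python repr of a str (exact on the printable-ASCII + tab/newline/CR domain);
-- both Pythons call the same builtin f"{…!r}".
def pyReprChar (q : Char) (c : Char) : List Char :=
  if c = '\\' then ['\\', '\\']
  else if c = q then ['\\', q]
  else if c = '\t' then ['\\', 't']
  else if c = '\n' then ['\\', 'n']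
  else if c = '\r' then ['\\', 'r']
  else [c]

def pyRepr (s : String) : String :=
  let cs := s.toList
  let q : Char := if cs.contains '\'' && !cs.contains '"' then '"' else '\''
  String.ofList (q :: cs.flatMap (pyReprChar q) ++ [q])

def fmtMissing (k v : String) : String := k ++ " (ref=" ++ pyRepr v ++ ")"
def fmtMismatch (k vref vcand : String) : String :=
  k ++ ": ref=" ++ pyRepr vref ++ " cand=" ++ pyRepr vcand

-- ===== PORT A =====
def diff_scalars (reference : List (String × String)) (candidate : List (String × String)) (ignore : List String) : List String × List String × List String :=
  reference.foldl
    (fun acc kv =>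
      let matched := acc.1
      let mismatched := acc.2.1
      let missing := acc.2.2
      if ignore.contains kv.1 then acc
      else
        match (PySem.Dict.mk candidate).get? kv.1 with
        | none => (matched, mismatched, missing ++ [fmtMissing kv.1 kv.2])
        | some vcand =>
          if kv.2 ≠ vcand then (matched, mismatched ++ [fmtMismatch kv.1 kv.2 vcand], missing)
          else (matched ++ [kv.1], mismatched, missing))
    ([], [], [])

-- ===== PORT B =====
def diff_scalars_alt (reference : List (String × String)) (candidate : List (String × String)) (ignore : List String) : List String × List String × List String :=
  let get := fun k => (PySem.Dict.mk candidate).get? k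
  ( (reference.filter
       (fun kv => !ignore.contains kv.1 && (get kv.1).isSome && (get kv.1 == some kv.2))).map Prod.fst,
    (reference.filterMap
       (fun kv =>
         if !ignore.contains kv.1 && (get kv.1).isSome && !(get kv.1 == some kv.2) then
           some (fmtMismatch kv.1 kv.2 ((get kv.1).getD ""))
         else none)),
    (reference.filterMap
       (fun kv =>
         if !ignore.contains kv.1 && !(get kv.1).isSome then some (fmtMissing kv.1 kv.2)
         else none)) )

-- ===== PRECONDITION & SPEC =====
def Spec_diff_scalars (reference : List (String × String)) (candidate : List (String × String)) (ignore : List String) (out : List String × List String × List String) : Prop := out = diff_scalars_alt reference candidate ignore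
instance (reference : List (String × String)) (candidate : List (String × String)) (ignore : List String) (out : List String × List String × List String) : Decidable (Spec_diff_scalars reference candidate ignore out) := by unfold Spec_diff_scalars; infer_instance

-- ===== CLAIM (what is proved, stated in full; the proofs are below) =====
def Claim_equal_diff_scalars : Prop := ∀ (reference : List (String × String)) (candidate : List (String × String)) (ignore : List String), Dom_diff_scalars reference candidate ignore → Spec_diff_scalars reference candidate ignore (diff_scalars reference candidate ignore)

-- ===== LEMMAS AND PROOFS =====

theorem diff_scalars_loop_eq (candidate : List (String × String)) (ignore : List String)
    (reference : List (String × String)) (acc : List String × List String × List String) :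
    reference.foldl
      (fun acc kv =>
        let matched := acc.1
        let mismatched := acc.2.1
        let missing := acc.2.2
        if ignore.contains kv.1 then acc
        else
          match (PySem.Dict.mk candidate).get? kv.1 with
          | none => (matched, mismatched, missing ++ [fmtMissing kv.1 kv.2])
          | some vcand =>
            if kv.2 ≠ vcand then (matched, mismatched ++ [fmtMismatch kv.1 kv.2 vcand], missing)
            else (matched ++ [kv.1], mismatched, missing))
      acc
    = (acc.1 ++ (diff_scalars_alt reference candidate ignore).1,
       acc.2.1 ++ (diff_scalars_alt reference candidate ignore).2.1,
       acc.2.2 ++ (diff_scalars_alt reference candidate ignore).2.2) := by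
  induction reference generalizing acc with
  | nil => simp [diff_scalars_alt]
  | cons kv rest ih =>
    rw [List.foldl_cons, ih]
    by_cases hig : kv.1 ∈ ignore
    · simp [diff_scalars_alt, hig]
    · cases hget : (PySem.Dict.mk candidate).get? kv.1 with
      | none => simp [diff_scalars_alt, hig, hget]
      | some vcand =>
        by_cases heq : kv.2 = vcand
        · subst heq; simp [diff_scalars_alt, hig, hget]
        · simp [diff_scalars_alt, hig, hget, heq, Ne.symm heq]

-- ===== VERDICT (by name: the statement is the Claim_ definition above) =====
theorem diff_scalars_spec : Claim_equal_diff_scalars := by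
  intro reference candidate ignore _
  unfold Spec_diff_scalars diff_scalars
  rw [diff_scalars_loop_eq]
  simp
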